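-- pv_equiv track=rewrite | github.com/Cypher30/AI-final-project-GOMOKU | src/abpruning_wine/alpha_beta3.py | count_five
-- ===== SOURCE A (Python) =====
-- Empty = 2
--
-- def count_five(path, role):
--     five = 0
--     for i in range(9):
--         if path[i] == Empty:
--             count = 0
--             j = i - 1
--             while j >= 0 and path[j] == role:
--                 count += 1
--                 j -= 1
--             j = i + 1
--             while j <= 8 and path[j] == role:
--                 count += 1
--                 j += 1
--             if count >= 4:
--                 five += 1
--     return five
-- ===== SOURCE B (Python) =====
-- Empty = 2
--
-- def count_five(path, role):
--     # run-length arrays: left[i] = role-run length ending at i-1 (scanning up),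
--     # right[k] = role-run length starting at 9-k (scanning down); then one pass.
--     left = [0]
--     for i in range(8):
--         left.append(left[-1] + 1 if path[i] == role else 0)
--     right = [0]
--     for i in range(8):
--         right.append(right[-1] + 1 if path[8 - i] == role else 0)
--     five = 0
--     for i in range(9):
--         if path[i] == Empty and left[i] + right[8 - i] >= 4:
--             five += 1
--     return five
-- ===== Notes on version B (the rewrite author's own statement) =====
-- stated objective: alternative
-- what changed: Per-empty-cell bidirectional while-loop rescans are replaced by two run-length prefix/suffix arrays built in single forward and backward passes plus one final counting pass.
-- outside the precondition, e.g. on count_five([2, 2, 2], 1): A raises IndexError, B raises IndexError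
import Mathlib
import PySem

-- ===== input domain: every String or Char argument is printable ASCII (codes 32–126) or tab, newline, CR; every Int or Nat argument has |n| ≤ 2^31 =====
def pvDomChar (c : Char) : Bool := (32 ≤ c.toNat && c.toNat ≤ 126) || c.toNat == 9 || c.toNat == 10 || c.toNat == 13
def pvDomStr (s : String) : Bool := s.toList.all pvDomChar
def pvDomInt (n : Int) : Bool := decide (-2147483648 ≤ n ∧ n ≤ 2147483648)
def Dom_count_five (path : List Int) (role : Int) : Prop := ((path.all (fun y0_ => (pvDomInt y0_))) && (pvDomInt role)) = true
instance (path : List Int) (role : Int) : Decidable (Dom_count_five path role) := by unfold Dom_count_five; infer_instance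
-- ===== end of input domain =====

-- B replaces A's per-cell left/right rescans by two run-length prefix arrays and one final pass (alternative decomposition, same window).

-- shared indexing helper: path[j]; every access has 0 ≤ j ≤ 8 and is in range under Pre_ (9 ≤ path.length), so the .getD 0 default is never used
def cfGet (path : List Int) (j : Int) : Int := (PySem.List.pyGet? path j).getD 0

-- ===== PORT A =====
-- while j >= 0 and path[j] == role: count += 1; j -= 1   (fuel 9 ≥ number of iterations)
def cfDown (path : List Int) (role : Int) : Nat → Int → Int → Int
  | 0, _, count => count
  | fuel+1, j, count =>
    if 0 ≤ j ∧ cfGet path j = role then cfDown path role fuel (j-1) (count+1) else count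

-- while j <= 8 and path[j] == role: count += 1; j += 1
def cfUp (path : List Int) (role : Int) : Nat → Int → Int → Int
  | 0, _, count => count
  | fuel+1, j, count =>
    if j ≤ 8 ∧ cfGet path j = role then cfUp path role fuel (j+1) (count+1) else count

def count_five (path : List Int) (role : Int) : Int :=
  (List.range 9).foldl (fun five (i : Nat) =>
    if cfGet path (i : Int) = 2 then
      let count := cfUp path role 9 ((i : Int)+1) (cfDown path role 9 ((i : Int)-1) 0)
      if 4 ≤ count then five + 1 else five
    else five) 0

-- ===== PORT B =====
-- the common shape of Source B's two array-building loops: l = [0]; for n in range(8): l.append(l[-1]+1 if path[f(n)] == role else 0)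
def cfRunAux (path : List Int) (role : Int) (f : Nat → Nat) : Nat → List Int
  | 0 => [0]
  | n+1 =>
    let l := cfRunAux path role f n
    l ++ [if cfGet path ((f n : Nat) : Int) = role then (PySem.List.pyGet? l (-1)).getD 0 + 1 else 0]

def count_five_alt (path : List Int) (role : Int) : Int :=
  let left := cfRunAux path role (fun i => i) 8
  let right := cfRunAux path role (fun i => 8 - i) 8
  (List.range 9).foldl (fun five (i : Nat) =>
    if cfGet path (i : Int) = 2 ∧
       4 ≤ (PySem.List.pyGet? left (i : Int)).getD 0 + (PySem.List.pyGet? right ((8 - i : Nat) : Int)).getD 0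
    then five + 1 else five) 0

-- ===== PRECONDITION & SPEC =====
-- Pre_ excludes exactly the paths of length < 9, on which both Pythons raise IndexError (indices 0..8 are accessed)
def Pre_count_five (path : List Int) (role : Int) : Prop := 9 ≤ path.length
instance (path : List Int) (role : Int) : Decidable (Pre_count_five path role) := by unfold Pre_count_five; infer_instance
def pvWitness_count_five : List Int × Int := ([2, 1, 1, 1, 1, 2, 0, 0, 2], 1)

def Spec_count_five (path : List Int) (role : Int) (out : Int) : Prop := out = count_five_alt path role
instance (path : List Int) (role : Int) (out : Int) : Decidable (Spec_count_five path role out) := by unfold Spec_count_five; infer_instance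

-- ===== CLAIM (what is proved, stated in full; the proofs are below) =====
def Claim_equal_count_five : Prop := ∀ (path : List Int) (role : Int), Dom_count_five path role → Pre_count_five path role → Spec_count_five path role (count_five path role)

-- ===== LEMMAS AND PROOFS =====

-- the run-length recurrence both programs compute
def cfRun (path : List Int) (role : Int) (f : Nat → Nat) : Nat → Int
  | 0 => 0
  | n+1 => if cfGet path ((f n : Nat) : Int) = role then cfRun path role f n + 1 else 0

lemma cfRunAux_eq (path : List Int) (role : Int) (f : Nat → Nat) (n : Nat) :
    cfRunAux path role f n = (List.range (n+1)).map (cfRun path role f) := by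
  induction n with
  | zero => simp [cfRunAux, cfRun]
  | succ n ih =>
    rw [cfRunAux, ih]
    have hlast : PySem.List.pyGet? ((List.range (n+1)).map (cfRun path role f)) (-1)
        = some (cfRun path role f n) := by
      rw [PySem.List.pyGet?_neg_one]
      simp [List.range_succ]
    rw [hlast]
    simp only [List.range_succ (n := n+1), List.map_append, List.map_cons, List.map_nil]
    simp [cfRun]

lemma cfRunAux_get (path : List Int) (role : Int) (f : Nat → Nat) (i : Nat) (hi : i ≤ 8) :
    (PySem.List.pyGet? (cfRunAux path role f 8) (i : Int)).getD 0 = cfRun path role f i := by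
  rw [cfRunAux_eq, PySem.List.pyGet?_natCast]
  simp [Nat.lt_succ_of_le hi]

lemma cfDown_eq (path : List Int) (role : Int) (i : Nat) :
    ∀ (fuel : Nat) (c : Int), i ≤ fuel →
      cfDown path role fuel ((i : Int) - 1) c = c + cfRun path role (fun k => k) i := by
  induction i with
  | zero =>
    intro fuel c _
    cases fuel with
    | zero => simp [cfDown, cfRun]
    | succ fuel =>
      rw [cfDown, if_neg (by omega), cfRun]; ring
  | succ i ih =>
    intro fuel c hf
    obtain ⟨fuel, rfl⟩ : ∃ f', fuel = f' + 1 := ⟨fuel - 1, by omega⟩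
    have hj : ((i + 1 : Nat) : Int) - 1 = (i : Int) := by push_cast; ring
    rw [cfDown, hj, cfRun]
    by_cases h : cfGet path (i : Int) = role
    · rw [if_pos ⟨by positivity, h⟩, if_pos h, ih fuel (c + 1) (by omega)]
      ring
    · rw [if_neg (by tauto), if_neg h]; ring

lemma cfUp_eq (path : List Int) (role : Int) (m : Nat) :
    ∀ (fuel : Nat) (c : Int), m ≤ fuel → m ≤ 9 →
      cfUp path role fuel ((9 - m : Nat) : Int) c = c + cfRun path role (fun k => 8 - k) m := by
  induction m with
  | zero =>
    intro fuel c _ _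
    cases fuel with
    | zero => simp [cfUp, cfRun]
    | succ fuel =>
      rw [cfUp, if_neg (by norm_num), cfRun]; ring
  | succ m ih =>
    intro fuel c hf hm
    obtain ⟨fuel, rfl⟩ : ∃ f', fuel = f' + 1 := ⟨fuel - 1, by omega⟩
    have h9 : ((9 - (m+1) : Nat) : Int) = ((8 - m : Nat) : Int) := by
      congr 1; omega
    have hsucc : ((8 - m : Nat) : Int) + 1 = ((9 - m : Nat) : Int) := by
      have : (9 - m : Nat) = (8 - m : Nat) + 1 := by omega
      rw [this]; push_cast; ring
    have hle : ((8 - m : Nat) : Int) ≤ 8 := by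
      have : (8 - m : Nat) ≤ 8 := by omega
      exact_mod_cast this
    rw [cfUp, h9, cfRun]
    by_cases h : cfGet path ((8 - m : Nat) : Int) = role
    · rw [if_pos ⟨hle, h⟩, hsucc, ih fuel (c + 1) (by omega) (by omega), if_pos h]
      ring
    · rw [if_neg (by tauto), if_neg h]; ring

-- ===== VERDICT (by name: the statement is the Claim_ definition above) =====
theorem count_five_spec : Claim_equal_count_five := by
  intro path role _ _
  show count_five path role = count_five_alt path role
  unfold count_five count_five_alt
  apply PySem.List.foldl_congr_mem
  intro five i hi
  have hi8 : i ≤ 8 := by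
    have := List.mem_range.mp hi; omega
  have hd : cfDown path role 9 ((i : Int) - 1) 0 = cfRun path role (fun k => k) i := by
    rw [cfDown_eq path role i 9 0 (by omega)]; ring
  have hu9 : ((9 - (8 - i) : Nat) : Int) = (i : Int) + 1 := by
    have : (9 - (8 - i) : Nat) = i + 1 := by omega
    rw [this]; push_cast; ring
  have hu : cfUp path role 9 ((i : Int) + 1) (cfRun path role (fun k => k) i)
      = cfRun path role (fun k => k) i + cfRun path role (fun k => 8 - k) (8 - i) := by
    rw [← hu9, cfUp_eq path role (8 - i) 9 _ (by omega) (by omega)]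
  simp only [hd, hu, cfRunAux_get path role _ i hi8,
    cfRunAux_get path role (fun k => 8 - k) (8 - i) (by omega)]
  by_cases he : cfGet path (i : Int) = 2
  · by_cases hc : 4 ≤ cfRun path role (fun k => k) i + cfRun path role (fun k => 8 - k) (8 - i)
    · rw [if_pos he, if_pos hc, if_pos ⟨he, hc⟩]
    · rw [if_pos he, if_neg hc, if_neg (by tauto)]
  · rw [if_neg he, if_neg (by tauto)]
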